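-- pv_equiv track=rewrite | github.com/hbot07/COL215-Assignments | ass 2/main2.py | reduce_1_literal
-- ===== SOURCE A (Python) =====
-- def reduce_1_literal(binary_func_TRUE, binary_func_DC=[]):
--     expanded_binary = []
--     for i in range(len(binary_func_TRUE)):
--         binary1 = binary_func_TRUE[i].copy()
--         for j in range(len(binary1)):
--             if binary1[j] is not None:
--                 binary1[j] = not binary1[j]
--                 if binary1 in binary_func_TRUE + binary_func_DC:
--                     binary2 = binary1.copy()
--                     binary2[j] = None
--                     if binary2 not in expanded_binary:  # not efficient
--                         expanded_binary.append(binary2)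
--                 binary1[j] = not binary1[j]
--     return expanded_binary
-- ===== SOURCE B (Python) =====
-- def reduce_1_literal(binary_func_TRUE, binary_func_DC=[]):
--     # Phase 1: bucket every clause of TRUE+DC by (position j, clause with position j
--     # masked out), recording the set of polarities seen at j in that bucket; a bucket
--     # holding both polarities means the two complementary clauses exist and merge
--     # into the masked clause.
--     polarity = {}
--     for c in binary_func_TRUE + binary_func_DC:
--         for j, u in enumerate(c):
--             if u is not None:
--                 key = (j, tuple(c[:j]), tuple(c[j + 1:]))
--                 polarity[key] = polarity.get(key, set()) | {u}
--     # Phase 2: emit, in A's order (TRUE order, j ascending, first-seen dedup), each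
--     # masked clause whose bucket holds both polarities.
--     expanded = []
--     for term in binary_func_TRUE:
--         for j, v in enumerate(term):
--             if v is not None and len(polarity.get((j, tuple(term[:j]), tuple(term[j + 1:])), set())) == 2:
--                 merged = term[:j] + [None] + term[j + 1:]
--                 if merged not in expanded:
--                     expanded.append(merged)
--     return expanded
-- ===== Notes on version B (the rewrite author's own statement) =====
-- stated objective: alternative
-- what changed: B replaces A's flip-a-literal-then-search-TRUE+DC scheme by a two-phase grouping algorithm: phase 1 buckets every clause of TRUE+DC under the key (position j, clause with j masked out) and records the set of polarities seen at j; phase 2 emits, in A's order, each masked clause whose bucket holds both polarities - no clause is ever flipped and no membership scan over the input lists remains.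
import Mathlib
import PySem

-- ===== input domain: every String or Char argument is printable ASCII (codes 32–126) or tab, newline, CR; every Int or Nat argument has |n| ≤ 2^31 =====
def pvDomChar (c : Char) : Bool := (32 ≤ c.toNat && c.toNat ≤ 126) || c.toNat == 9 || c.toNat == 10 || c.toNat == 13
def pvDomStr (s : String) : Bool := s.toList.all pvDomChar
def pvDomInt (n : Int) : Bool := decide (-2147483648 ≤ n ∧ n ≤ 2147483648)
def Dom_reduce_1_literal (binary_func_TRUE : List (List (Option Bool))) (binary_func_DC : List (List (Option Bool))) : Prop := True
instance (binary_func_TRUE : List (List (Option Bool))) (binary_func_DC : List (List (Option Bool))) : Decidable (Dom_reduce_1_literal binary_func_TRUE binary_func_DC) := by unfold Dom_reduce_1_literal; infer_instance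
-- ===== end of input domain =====

-- ===== PORT A =====
-- B replaces A's flip-a-literal-then-search-TRUE+DC scheme by a two-phase grouping algorithm
-- (bucket clauses by masked clause, then read off buckets holding both polarities);
-- objective: alternative decomposition, no speedup claimed.
def pvInnerA (binary_func_TRUE : List (List (Option Bool))) (binary_func_DC : List (List (Option Bool)))
    (binary1 : List (Option Bool)) (expanded : List (List (Option Bool))) : List (List (Option Bool)) :=
  (PySem.List.pyRange 0 binary1.length 1).foldl (fun expanded j =>
    match PySem.List.pyGetD binary1 j none with
    | none => expanded
    | some b =>
      -- binary1[j] = not binary1[j]  (restored after the test, so binary1 is unchanged at each iteration start)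
      let flipped := binary1.set j.toNat (some (!b))
      if flipped ∈ binary_func_TRUE ++ binary_func_DC then
        let binary2 := flipped.set j.toNat none
        if binary2 ∈ expanded then expanded else expanded ++ [binary2]
      else expanded) expanded

def reduce_1_literal (binary_func_TRUE : List (List (Option Bool))) (binary_func_DC : List (List (Option Bool))) : List (List (Option Bool)) :=
  (PySem.List.pyRange 0 binary_func_TRUE.length 1).foldl (fun expanded i =>
    pvInnerA binary_func_TRUE binary_func_DC (PySem.List.pyGetD binary_func_TRUE i []) expanded) []

-- ===== PORT B =====
-- phase 1, one clause: for each non-None position j of c, add c[j] to the polarity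
-- bucket keyed by (j, c[:j], c[j+1:])  (= the clause with position j masked out)
def pvBucketOne (d : PySem.Dict (Int × List (Option Bool) × List (Option Bool)) (PySem.Set Bool))
    (c : List (Option Bool)) : PySem.Dict (Int × List (Option Bool) × List (Option Bool)) (PySem.Set Bool) :=
  (PySem.List.enumerate c).foldl (fun d ju =>
    match ju.2 with
    | none => d
    | some u => d.modify (ju.1, c.take ju.1.toNat, c.drop (ju.1.toNat + 1)) PySem.Set.empty
        (fun s => PySem.Set.union s [u])) d

-- phase 2, one term: emit term masked at j when the bucket at (j, term[:j], term[j+1:]) has both polarities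
def pvInnerB (polarity : PySem.Dict (Int × List (Option Bool) × List (Option Bool)) (PySem.Set Bool))
    (term : List (Option Bool)) (expanded : List (List (Option Bool))) : List (List (Option Bool)) :=
  (PySem.List.enumerate term).foldl (fun expanded jv =>
    match jv.2 with
    | none => expanded
    | some _ =>
      if PySem.Set.len (polarity.getD (jv.1, term.take jv.1.toNat, term.drop (jv.1.toNat + 1)) PySem.Set.empty) = 2 then
        let merged := term.take jv.1.toNat ++ [none] ++ term.drop (jv.1.toNat + 1)
        if merged ∈ expanded then expanded else expanded ++ [merged]
      else expanded) expanded

def reduce_1_literal_alt (binary_func_TRUE : List (List (Option Bool))) (binary_func_DC : List (List (Option Bool))) : List (List (Option Bool)) :=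
  let polarity := (binary_func_TRUE ++ binary_func_DC).foldl pvBucketOne PySem.Dict.empty
  binary_func_TRUE.foldl (fun expanded term => pvInnerB polarity term expanded) []

-- ===== PRECONDITION & SPEC =====
def Spec_reduce_1_literal (binary_func_TRUE : List (List (Option Bool))) (binary_func_DC : List (List (Option Bool))) (out : List (List (Option Bool))) : Prop := out = reduce_1_literal_alt binary_func_TRUE binary_func_DC
instance (binary_func_TRUE : List (List (Option Bool))) (binary_func_DC : List (List (Option Bool))) (out : List (List (Option Bool))) : Decidable (Spec_reduce_1_literal binary_func_TRUE binary_func_DC out) := by unfold Spec_reduce_1_literal; infer_instance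

-- ===== CLAIM (what is proved, stated in full; the proofs are below) =====
def Claim_equal_reduce_1_literal : Prop := ∀ (binary_func_TRUE : List (List (Option Bool))) (binary_func_DC : List (List (Option Bool))), Dom_reduce_1_literal binary_func_TRUE binary_func_DC → Spec_reduce_1_literal binary_func_TRUE binary_func_DC (reduce_1_literal binary_func_TRUE binary_func_DC)

-- ===== LEMMAS AND PROOFS =====

-- what pvBucketOne contributes to the bucket at key: one polarity per non-None position of w
theorem pv_mem_bucketOne (d : PySem.Dict (Int × List (Option Bool) × List (Option Bool)) (PySem.Set Bool))
    (w : List (Option Bool)) (key : Int × List (Option Bool) × List (Option Bool)) (u : Bool) :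
    u ∈ (pvBucketOne d w).getD key PySem.Set.empty ↔ u ∈ d.getD key PySem.Set.empty ∨
      ∃ j : Nat, j < w.length ∧ w.getD j none = some u ∧
        key = ((j : Int), w.take j, w.drop (j + 1)) := by
  unfold pvBucketOne
  have key_lem : ∀ (ps : List (Int × Option Bool)) (d : PySem.Dict (Int × List (Option Bool) × List (Option Bool)) (PySem.Set Bool)),
      u ∈ (ps.foldl (fun d ju =>
        match ju.2 with
        | none => d
        | some u => d.modify (ju.1, w.take ju.1.toNat, w.drop (ju.1.toNat + 1)) PySem.Set.empty
            (fun s => PySem.Set.union s [u])) d).getD key PySem.Set.empty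
      ↔ u ∈ d.getD key PySem.Set.empty ∨ ∃ p ∈ ps, p.2 = some u ∧
          key = (p.1, w.take p.1.toNat, w.drop (p.1.toNat + 1)) := by
    intro ps
    induction ps with
    | nil => simp
    | cons p t ih =>
      intro d
      rcases p with ⟨i, o⟩
      cases o with
      | none =>
        simp only [List.foldl_cons]
        rw [ih]
        simp only [List.mem_cons]
        constructor
        · rintro (h | h)
          · exact Or.inl h
          · obtain ⟨q, hq, hr⟩ := h
            exact Or.inr ⟨q, Or.inr hq, hr⟩
        · rintro (h | ⟨q, rfl | hq, hu', hx⟩)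
          · exact Or.inl h
          · exact absurd hu' (by simp)
          · exact Or.inr ⟨q, hq, hu', hx⟩
      | some b =>
        simp only [List.foldl_cons]
        rw [ih, PySem.Dict.getD_modify]
        simp only [List.mem_cons]
        by_cases hk : key = (i, w.take i.toNat, w.drop (i.toNat + 1))
        · subst hk
          rw [if_pos rfl, PySem.Set.mem_union]
          simp only [List.mem_singleton]
          constructor
          · rintro ((h | rfl) | h)
            · exact Or.inl h
            · exact Or.inr ⟨(i, some u), Or.inl rfl, rfl, rfl⟩
            · obtain ⟨q, hq, hr⟩ := h
              exact Or.inr ⟨q, Or.inr hq, hr⟩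
          · rintro (h | ⟨q, rfl | hq, hu', hx⟩)
            · exact Or.inl (Or.inl h)
            · simp only [Option.some.injEq] at hu'
              exact Or.inl (Or.inr hu'.symm)
            · exact Or.inr ⟨q, hq, hu', hx⟩
        · rw [if_neg hk]
          constructor
          · rintro (h | h)
            · exact Or.inl h
            · obtain ⟨q, hq, hr⟩ := h
              exact Or.inr ⟨q, Or.inr hq, hr⟩
          · rintro (h | ⟨q, rfl | hq, hu', hx⟩)
            · exact Or.inl h
            · exact absurd hx hk
            · exact Or.inr ⟨q, hq, hu', hx⟩
  rw [key_lem]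
  apply or_congr Iff.rfl
  constructor
  · rintro ⟨p, hp, hu, hx⟩
    obtain ⟨k, hk, rfl⟩ := (PySem.List.mem_enumerate_iff w 0 p).mp hp
    refine ⟨k, hk, ?_, ?_⟩
    · rw [List.getD_eq_getElem w none hk]
      simpa using hu
    · simpa using hx
  · rintro ⟨j, hj, hu, hx⟩
    refine ⟨((j : Int), w[j]), (PySem.List.mem_enumerate_iff w 0 _).mpr ⟨j, hj, by simp⟩, ?_, ?_⟩
    · show w[j] = some u
      rw [← List.getD_eq_getElem w none hj]; exact hu
    · simpa using hx

-- the full polarity dict: the bucket at key collects the polarities of all matching clauses of L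
theorem pv_mem_polarity (L : List (List (Option Bool)))
    (key : Int × List (Option Bool) × List (Option Bool)) (u : Bool) :
    u ∈ (L.foldl pvBucketOne PySem.Dict.empty).getD key PySem.Set.empty ↔
      ∃ w ∈ L, ∃ j : Nat, j < w.length ∧ w.getD j none = some u ∧
        key = ((j : Int), w.take j, w.drop (j + 1)) := by
  suffices h : ∀ (d : PySem.Dict (Int × List (Option Bool) × List (Option Bool)) (PySem.Set Bool)),
      u ∈ (L.foldl pvBucketOne d).getD key PySem.Set.empty ↔ u ∈ d.getD key PySem.Set.empty ∨
        ∃ w ∈ L, ∃ j : Nat, j < w.length ∧ w.getD j none = some u ∧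
          key = ((j : Int), w.take j, w.drop (j + 1)) by
    rw [h]
    simp [PySem.Dict.getD_empty, PySem.Set.empty]
  induction L with
  | nil => simp
  | cons a t ih =>
    intro d
    simp only [List.foldl_cons]
    rw [ih, pv_mem_bucketOne]
    simp only [List.mem_cons]
    constructor
    · rintro ((h | h) | h)
      · exact Or.inl h
      · exact Or.inr ⟨a, Or.inl rfl, h⟩
      · obtain ⟨w, hc, hr⟩ := h
        exact Or.inr ⟨w, Or.inr hc, hr⟩
    · rintro (h | ⟨w, rfl | hc, hr⟩)
      · exact Or.inl (Or.inl h)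
      · exact Or.inl (Or.inr hr)
      · exact Or.inr ⟨w, hc, hr⟩

-- every bucket is a genuine set (no duplicate polarities)
theorem pv_nodup_polarity (L : List (List (Option Bool)))
    (key : Int × List (Option Bool) × List (Option Bool)) :
    ((L.foldl pvBucketOne PySem.Dict.empty).getD key PySem.Set.empty).Nodup := by
  suffices h : ∀ (d : PySem.Dict (Int × List (Option Bool) × List (Option Bool)) (PySem.Set Bool)),
      (∀ k, (d.getD k PySem.Set.empty).Nodup) →
      ∀ k, ((L.foldl pvBucketOne d).getD k PySem.Set.empty).Nodup by
    exact h PySem.Dict.empty (fun k => by simp [PySem.Dict.getD_empty, PySem.Set.empty]) key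
  induction L with
  | nil => intro d hd k; simpa using hd k
  | cons a t ih =>
    intro d hd k
    simp only [List.foldl_cons]
    refine ih (pvBucketOne d a) ?_ k
    intro k'
    unfold pvBucketOne
    have inner : ∀ (ps : List (Int × Option Bool)) (d : PySem.Dict (Int × List (Option Bool) × List (Option Bool)) (PySem.Set Bool)),
        (∀ k, (d.getD k PySem.Set.empty).Nodup) →
        ∀ k, ((ps.foldl (fun d ju =>
          match ju.2 with
          | none => d
          | some u => d.modify (ju.1, a.take ju.1.toNat, a.drop (ju.1.toNat + 1)) PySem.Set.empty
              (fun s => PySem.Set.union s [u])) d).getD k PySem.Set.empty).Nodup := by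
      intro ps
      induction ps with
      | nil => intro d hd k; simpa using hd k
      | cons p t ih2 =>
        intro d hd k
        rcases p with ⟨i, o⟩
        cases o with
        | none => simpa using ih2 d hd k
        | some b =>
          simp only [List.foldl_cons]
          refine ih2 _ ?_ k
          intro k2
          rw [PySem.Dict.getD_modify]
          split_ifs with hk2
          · exact PySem.Set.nodup_union _ _ (hd _)
          · exact hd k2
    exact inner (PySem.List.enumerate a) d hd k'
-- a duplicate-free list of Booleans has length 2 exactly when it holds both polarities
theorem pv_bool_set_two (s : List Bool) (hs : s.Nodup) :
    PySem.Set.len s = 2 ↔ true ∈ s ∧ false ∈ s := by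
  match s with
  | [] => simp [PySem.Set.len]
  | [a] =>
    constructor
    · intro h; exfalso; simp [PySem.Set.len] at h
    · rintro ⟨h1, h2⟩
      simp only [List.mem_singleton] at h1 h2
      subst h1
      exact absurd h2 (by decide)
  | a :: b :: t =>
    have hab : a ≠ b := by
      simp only [List.nodup_cons, List.mem_cons] at hs
      exact fun h => hs.1 (Or.inl h)
    constructor
    · intro _
      constructor
      · cases a
        · cases b
          · exact absurd rfl hab
          · exact List.mem_cons_of_mem _ (List.mem_cons_self)
        · exact List.mem_cons_self
      · cases a
        · exact List.mem_cons_self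
        · cases b
          · exact List.mem_cons_of_mem _ (List.mem_cons_self)
          · exact absurd rfl hab
    · intro _
      have ht : t = [] := by
        by_contra hne
        rcases t with _ | ⟨c, t'⟩
        · exact hne rfl
        · simp only [List.nodup_cons, List.mem_cons] at hs
          have h1 : a ≠ c := fun h => hs.1 (Or.inr (Or.inl h))
          have h2 : b ≠ c := fun h => hs.2.1 (Or.inl h)
          revert hab h1 h2; cases a <;> cases b <;> cases c <;> decide
      subst ht
      simp [PySem.Set.len]

-- the bucket test for (term, j, v), term ∈ L, succeeds exactly when the flipped clause occurs in L
theorem pv_lookup_iff (L : List (List (Option Bool))) (term : List (Option Bool))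
    (hmemT : term ∈ L) (j : Nat) (hj : j < term.length) (v : Bool)
    (hv : term.getD j none = some v) :
    (PySem.Set.len ((L.foldl pvBucketOne PySem.Dict.empty).getD
        ((j : Int), term.take j, term.drop (j + 1)) PySem.Set.empty) = 2)
      ↔ (term.set j (some (!v))) ∈ L := by
  rw [pv_bool_set_two _ (pv_nodup_polarity L _)]
  have hvmem : v ∈ (L.foldl pvBucketOne PySem.Dict.empty).getD
      ((j : Int), term.take j, term.drop (j + 1)) PySem.Set.empty :=
    (pv_mem_polarity L _ v).mpr ⟨term, hmemT, j, hj, hv, rfl⟩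
  have hboth : (true ∈ (L.foldl pvBucketOne PySem.Dict.empty).getD
        ((j : Int), term.take j, term.drop (j + 1)) PySem.Set.empty ∧
      false ∈ (L.foldl pvBucketOne PySem.Dict.empty).getD
        ((j : Int), term.take j, term.drop (j + 1)) PySem.Set.empty)
      ↔ (!v) ∈ (L.foldl pvBucketOne PySem.Dict.empty).getD
        ((j : Int), term.take j, term.drop (j + 1)) PySem.Set.empty := by
    cases v
    · simpa using fun _ => hvmem
    · exact ⟨fun h => h.2, fun h => ⟨hvmem, h⟩⟩
  rw [hboth, pv_mem_polarity]
  constructor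
  · rintro ⟨w, hc, j', hj', hu, hx⟩
    obtain ⟨hji, hpre, hsuf⟩ : ((j : Int) = (j' : Int)) ∧
        (term.take j = w.take j') ∧ (term.drop (j + 1) = w.drop (j' + 1)) := by
      simpa [Prod.ext_iff] using hx
    have hjj : j = j' := by exact_mod_cast hji
    subst hjj
    have hcj : w[j] = some (!v) := by
      rw [← List.getD_eq_getElem w none hj', hu]
    have hce : term.set j (some (!v)) = w := by
      rw [List.set_eq_take_cons_drop _ hj, hpre, hsuf, ← hcj,
        List.getElem_cons_drop, List.take_append_drop]
    rwa [hce]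
  · intro hmem
    refine ⟨term.set j (some (!v)), hmem, j, by simpa using hj, ?_, ?_⟩
    · rw [List.getD_eq_getElem _ none (by simpa using hj), List.getElem_set_self]
    · have h1 : (term.set j (some (!v))).take j = term.take j := by
        rw [List.set_eq_take_cons_drop _ hj, List.take_append_of_le_length (by simp [hj.le])]
        simp [hj.le]
      have h2 : (term.set j (some (!v))).drop (j + 1) = term.drop (j + 1) := by
        rw [List.set_eq_take_cons_drop _ hj, List.drop_append]
        simp [Nat.min_eq_left hj.le]
      simp [h1, h2]

-- merged, as A and B build it
theorem pv_merged_eq (term : List (Option Bool)) (j : Nat) (hj : j < term.length) (b : Bool) :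
    (term.set j (some (!b))).set j none
      = term.take j ++ [none] ++ term.drop (j + 1) := by
  rw [List.set_set, List.set_eq_take_cons_drop _ hj]
  simp

-- the two inner loops agree for every term of binary_func_TRUE
theorem pv_inner_eq (T DC : List (List (Option Bool))) (term : List (Option Bool))
    (hmemT : term ∈ T) (expanded : List (List (Option Bool))) :
    pvInnerA T DC term expanded
      = pvInnerB ((T ++ DC).foldl pvBucketOne PySem.Dict.empty) term expanded := by
  unfold pvInnerA pvInnerB
  rw [PySem.List.enumerate_eq_map_pyRange (d := none), List.foldl_map]
  apply PySem.List.foldl_congr_mem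
  intro acc j hjmem
  have hj0 : 0 ≤ j := (PySem.List.mem_pyRange_one.mp hjmem).1
  have hjn : j.toNat < term.length := by
    have := (PySem.List.mem_pyRange_one.mp hjmem).2
    omega
  have hget : PySem.List.pyGetD term j none = term.getD j.toNat none :=
    PySem.List.pyGetD_of_nonneg term none hj0
  rw [hget]
  cases hv : term.getD j.toNat none with
  | none => rfl
  | some v =>
    simp only
    have hmerge := pv_merged_eq term j.toNat hjn v
    rw [hmerge]
    have hjcast : ((j.toNat : Int)) = j := by omega
    refine if_congr ?_ rfl rfl
    rw [← hjcast]
    exact (pv_lookup_iff (T ++ DC) term (List.mem_append_left DC hmemT) j.toNat hjn v hv).symm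

-- ===== VERDICT (by name: the statement is the Claim_ definition above) =====
theorem reduce_1_literal_spec : Claim_equal_reduce_1_literal := by
  intro T DC _
  show reduce_1_literal T DC = reduce_1_literal_alt T DC
  unfold reduce_1_literal reduce_1_literal_alt
  rw [PySem.List.foldl_pyRange_zero_pyGetD' T [] (fun expanded b1 => pvInnerA T DC b1 expanded) []]
  exact PySem.List.foldl_congr_mem _ _ _ _ (fun acc x hx => pv_inner_eq T DC x hx acc)
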